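-- pv_equiv track=rewrite | github.com/yennanliu/CS_basics | leetcode_python/Bit_Manipulation/binary-watch.py | readBinaryWatch
-- ===== SOURCE A (Python) =====
-- def readBinaryWatch(num):
--     """
--     :type num: int
--     :rtype: List[str]
--     """
--     def bit_count(bits):
--         count = 0
--         while bits:
--             bits &= bits-1
--             count += 1
--         return count
--
--     return ['%d:%02d' % (h, m) for h in range(12) for m in range(60)
--             if bit_count(h) + bit_count(m) == num]
-- ===== SOURCE B (Python) =====
-- def readBinaryWatch(num):
--     # Enumerate subsets of the 10 LEDs (4 hour LEDs, 6 minute LEDs) with exactly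
--     # num lit, sum the chosen values, keep valid times, sort, then format.
--     leds = [(1, 0), (2, 0), (4, 0), (8, 0),
--             (0, 1), (0, 2), (0, 4), (0, 8), (0, 16), (0, 32)]
--
--     def choose(i, k, h, m):
--         if k == 0:
--             return [(h, m)] if h < 12 and m < 60 else []
--         if i == len(leds):
--             return []
--         dh, dm = leds[i]
--         return choose(i + 1, k - 1, h + dh, m + dm) + choose(i + 1, k, h, m)
--
--     times = sorted(choose(0, num, 0, 0), key=lambda hm: hm[0] * 60 + hm[1])
--     return ['%d:%02d' % (h, m) for h, m in times]
-- ===== Notes on version B (the rewrite author's own statement) =====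
-- stated objective: alternative
-- what changed: B enumerates subsets of the LED value positions with exactly num lit by a recursive include/exclude search that sums the chosen hour and minute values, keeps only in-range times, then sorts the collected (hour, minute) pairs numerically and formats them, instead of scanning every hour/minute clock time and popcounting each with a Kernighan bit-clearing loop.
import Mathlib
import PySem

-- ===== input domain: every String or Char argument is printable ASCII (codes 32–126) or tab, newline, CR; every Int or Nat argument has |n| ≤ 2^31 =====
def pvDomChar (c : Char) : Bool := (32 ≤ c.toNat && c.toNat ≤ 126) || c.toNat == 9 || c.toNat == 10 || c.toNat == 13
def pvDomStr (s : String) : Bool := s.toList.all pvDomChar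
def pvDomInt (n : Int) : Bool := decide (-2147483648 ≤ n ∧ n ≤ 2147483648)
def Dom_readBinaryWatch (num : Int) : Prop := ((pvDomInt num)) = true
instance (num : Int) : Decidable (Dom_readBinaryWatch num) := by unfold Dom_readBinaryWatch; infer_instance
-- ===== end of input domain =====

-- B does a recursive include/exclude enumeration of LED subsets with num lit LEDs,
-- then sorts and formats the valid (h,m) pairs, instead of scanning all 12*60 clock
-- times with a Kernighan popcount (objective: alternative algorithm).

-- '%d:%02d' % (h, m): h in decimal, m zero-padded to width 2 (exact for the 0 ≤ m values reached)
def pyFmtTime (h m : Int) : String :=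
  PySem.Int.toStr h ++ ":" ++
    (let s := PySem.Int.toStr m
     if s.length < 2 then "0" ++ s else s)

-- ===== PORT A =====
-- A's bit_count while-loop: 'while bits: bits &= bits-1; count += 1'.
-- Fuel 64 is enough for every call A makes (bits is 0..59, loops at most 6 times).
def bitCountAux : Nat → Int → Int → Int
  | 0, _, count => count
  | fuel + 1, bits, count =>
      if bits ≠ 0 then bitCountAux fuel (Int.land bits (bits - 1)) (count + 1) else count

def bitCount (bits : Int) : Int := bitCountAux 64 bits 0

def readBinaryWatch (num : Int) : List String :=
  (PySem.List.pyRange 0 12 1).flatMap (fun h =>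
    (PySem.List.pyRange 0 60 1).filterMap (fun m =>
      if bitCount h + bitCount m = num then some (pyFmtTime h m) else none))

-- ===== PORT B =====
-- the 10 LEDs as (hour value, minute value) pairs
def ledsB : List (Int × Int) :=
  [(1, 0), (2, 0), (4, 0), (8, 0), (0, 1), (0, 2), (0, 4), (0, 8), (0, 16), (0, 32)]

-- B's recursive choose(i, k, h, m): include or exclude each remaining LED,
-- keep a subset when k hits 0 and the summed time is valid (structural on the LED list)
def chooseB : List (Int × Int) → Int → Int → Int → List (Int × Int)
  | [], k, h, m =>
      if k = 0 then (if h < 12 ∧ m < 60 then [(h, m)] else []) else []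
  | (dh, dm) :: rest, k, h, m =>
      if k = 0 then (if h < 12 ∧ m < 60 then [(h, m)] else [])
      else chooseB rest (k - 1) (h + dh) (m + dm) ++ chooseB rest k h m

def readBinaryWatch_alt (num : Int) : List String :=
  (PySem.List.sorted (chooseB ledsB num 0 0) (fun hm => hm.1 * 60 + hm.2) false).map
    (fun hm => pyFmtTime hm.1 hm.2)

-- ===== PRECONDITION & SPEC =====
def Spec_readBinaryWatch (num : Int) (out : List String) : Prop := out = readBinaryWatch_alt num
instance (num : Int) (out : List String) : Decidable (Spec_readBinaryWatch num out) := by unfold Spec_readBinaryWatch; infer_instance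

-- ===== CLAIM =====
def Claim_equal_readBinaryWatch : Prop := ∀ (num : Int), Dom_readBinaryWatch num → Spec_readBinaryWatch num (readBinaryWatch num)

-- ===== LEMMAS AND PROOFS =====

def fmtPair (hm : Int × Int) : String := pyFmtTime hm.1 hm.2

-- the (count, h, m) triples A generates, before the count-equals-num filter
def triplesA : List (Int × Int × Int) :=
  (PySem.List.pyRange 0 12 1).flatMap (fun h =>
    (PySem.List.pyRange 0 60 1).map (fun m => (bitCount h + bitCount m, h, m)))

-- the (h, m) pairs A keeps for a given num (in A's generation order)
def pairsA (num : Int) : List (Int × Int) :=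
  triplesA.filterMap (fun t => if t.1 = num then some t.2 else none)

lemma A_as_pairs (num : Int) :
    readBinaryWatch num = (pairsA num).map fmtPair := by
  simp [readBinaryWatch, pairsA, triplesA, List.map_flatMap, List.map_filterMap,
        List.filterMap_flatMap, List.filterMap_map, Function.comp, fmtPair,
        Option.map_if]

set_option maxRecDepth 100000 in
lemma counts_bounded : ∀ t ∈ triplesA, 0 ≤ t.1 ∧ t.1 ≤ 10 := by decide

lemma pairsA_out_of_range (num : Int) (hnum : num < 0 ∨ 10 < num) :
    pairsA num = [] := by
  rw [pairsA, List.filterMap_eq_nil_iff]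
  intro t ht
  have := counts_bounded t ht
  have : t.1 ≠ num := by omega
  simp [this]

lemma chooseB_out_of_range (leds : List (Int × Int)) (k h m : Int)
    (hk : k < 0 ∨ (leds.length : Int) < k) :
    chooseB leds k h m = [] := by
  induction leds generalizing k h m with
  | nil =>
      have hk0 : k ≠ 0 := by simp at hk; omega
      simp [chooseB, hk0]
  | cons x rest ih =>
      obtain ⟨dh, dm⟩ := x
      have hk0 : k ≠ 0 := by simp at hk; omega
      have h1 : chooseB rest (k - 1) (h + dh) (m + dm) = [] := by
        apply ih; simp at hk ⊢; omega
      have h2 : chooseB rest k h m = [] := by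
        apply ih; simp at hk ⊢; omega
      simp [chooseB, hk0, h1, h2]

set_option maxRecDepth 100000 in
set_option maxHeartbeats 4000000 in
lemma pairs_eq (num : Int) :
    pairsA num = PySem.List.sorted (chooseB ledsB num 0 0) (fun hm => hm.1 * 60 + hm.2) false := by
  by_cases hr : 0 ≤ num ∧ num ≤ 10
  · obtain ⟨h0, h1⟩ := hr
    interval_cases num <;> decide
  · have hnum : num < 0 ∨ 10 < num := by omega
    have hc : chooseB ledsB num 0 0 = [] := by
      apply chooseB_out_of_range; simp [ledsB]; omega
    rw [pairsA_out_of_range num hnum, hc]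
    rfl

-- ===== VERDICT =====
theorem readBinaryWatch_spec : Claim_equal_readBinaryWatch := by
  intro num _
  unfold Spec_readBinaryWatch
  rw [A_as_pairs, readBinaryWatch_alt, pairs_eq]
  rfl
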